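-- pv_equiv track=rewrite | github.com/tom025/advent_of_code | 2025/src/aoc_2025/day_02/__init__.py | sum_invalid_product_ids
-- ===== SOURCE A (Python) =====
-- import collections
-- import itertools
--
-- def sum_invalid_product_ids(range_invalid_ids: collections.abc.Iterator[tuple[list[int], list[int]]]) -> tuple[int, int]:
--     def op(acc: tuple[int, int], sums: tuple[int, int]) -> tuple[int, int]:
--         sum_invalid_ids, sum_invalid_ids_new_rules = acc
--         s1, s2 = sums
--         return sum_invalid_ids + s1, sum_invalid_ids_new_rules + s2
--
--     return collections.deque(
--         itertools.accumulate(
--             ((sum(invalid_ids), sum(invalid_ids_new_rules)) for invalid_ids, invalid_ids_new_rules in range_invalid_ids),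
--             op,
--             initial=(0, 0)
--         )
--     ).pop()
-- ===== SOURCE B (Python) =====
-- import collections.abc
-- import itertools
--
--
-- def sum_invalid_product_ids(range_invalid_ids: collections.abc.Iterator[tuple[list[int], list[int]]]) -> tuple[int, int]:
--     # Materialize the iterator once, then flatten each column and sum the
--     # flat streams: no per-pair sums, no running pair accumulator.
--     pairs = list(range_invalid_ids)
--     old_ids = itertools.chain.from_iterable(a for a, _ in pairs)
--     new_ids = itertools.chain.from_iterable(b for _, b in pairs)
--     return sum(old_ids), sum(new_ids)
-- ===== Notes on version B (the rewrite author's own statement) =====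
-- stated objective: alternative
-- what changed: Instead of folding per-pair (sum,sum) tuples through accumulate into a deque and popping the last prefix, B materializes the pairs once and computes each total independently by flattening that column with itertools.chain and summing the flat stream of ids.
import Mathlib
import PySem

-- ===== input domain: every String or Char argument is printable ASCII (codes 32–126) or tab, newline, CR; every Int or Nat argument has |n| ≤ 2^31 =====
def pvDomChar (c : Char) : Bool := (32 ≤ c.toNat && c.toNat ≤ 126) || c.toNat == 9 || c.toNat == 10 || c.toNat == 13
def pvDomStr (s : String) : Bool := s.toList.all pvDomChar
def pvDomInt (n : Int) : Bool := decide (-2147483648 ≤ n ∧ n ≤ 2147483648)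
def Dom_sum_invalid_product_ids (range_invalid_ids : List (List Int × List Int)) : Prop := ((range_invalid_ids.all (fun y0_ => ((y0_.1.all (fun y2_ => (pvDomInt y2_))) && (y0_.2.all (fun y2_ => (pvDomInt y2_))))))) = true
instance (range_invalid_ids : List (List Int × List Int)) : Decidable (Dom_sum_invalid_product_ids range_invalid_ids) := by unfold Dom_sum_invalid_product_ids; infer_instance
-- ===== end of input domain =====

-- B replaces A's accumulate-into-deque-then-pop of per-pair sum tuples by flattening each
-- column of the materialized pairs and summing the flat id streams (objective: alternative).


-- ===== PORT A =====
-- op from A: pairwise addition of the two running totals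
def pvOpA (acc : Int × Int) (sums : Int × Int) : Int × Int :=
  (acc.1 + sums.1, acc.2 + sums.2)

-- itertools.accumulate with an initial value: the list of all prefix folds
def pvAccumulate (init : Int × Int) : List (Int × Int) → List (Int × Int)
  | [] => [init]
  | x :: rest => init :: pvAccumulate (pvOpA init x) rest

-- A: map each pair to its two sums, accumulate from (0,0), deque .pop() = last element
def sum_invalid_product_ids (range_invalid_ids : List (List Int × List Int)) : Int × Int :=
  (pvAccumulate (0, 0)
    (range_invalid_ids.map (fun p => (p.1.foldl (· + ·) 0, p.2.foldl (· + ·) 0)))).getLast!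

-- ===== PORT B =====
-- B: flatten each column of the pairs (itertools.chain.from_iterable), sum each flat stream
def sum_invalid_product_ids_alt (range_invalid_ids : List (List Int × List Int)) : Int × Int :=
  ((range_invalid_ids.flatMap (fun p => p.1)).foldl (· + ·) 0,
   (range_invalid_ids.flatMap (fun p => p.2)).foldl (· + ·) 0)

-- ===== PRECONDITION & SPEC =====
def Spec_sum_invalid_product_ids (range_invalid_ids : List (List Int × List Int)) (out : Int × Int) : Prop := out = sum_invalid_product_ids_alt range_invalid_ids
instance (range_invalid_ids : List (List Int × List Int)) (out : Int × Int) : Decidable (Spec_sum_invalid_product_ids range_invalid_ids out) := by unfold Spec_sum_invalid_product_ids; infer_instance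

-- ===== CLAIM (what is proved, stated in full; the proofs are below) =====
def Claim_equal_sum_invalid_product_ids : Prop := ∀ (range_invalid_ids : List (List Int × List Int)), Dom_sum_invalid_product_ids range_invalid_ids → Spec_sum_invalid_product_ids range_invalid_ids (sum_invalid_product_ids range_invalid_ids)

-- ===== LEMMAS AND PROOFS =====
theorem pvFoldlAdd (t : Int) (xs : List Int) : xs.foldl (· + ·) t = t + xs.foldl (· + ·) 0 := by
  induction xs generalizing t with
  | nil => simp
  | cons x rest ih =>
      simp only [List.foldl_cons]
      rw [ih (t + x), ih (0 + x)]
      ring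

theorem pvAccumulate_getLast (init : Int × Int) (xs : List (Int × Int)) :
    (pvAccumulate init xs).getLast! = xs.foldl pvOpA init := by
  induction xs generalizing init with
  | nil => rfl
  | cons x rest ih =>
      show (init :: pvAccumulate (pvOpA init x) rest).getLast! = List.foldl pvOpA (pvOpA init x) rest
      rw [← ih (pvOpA init x)]
      cases h : pvAccumulate (pvOpA init x) rest with
      | nil => cases rest <;> simp [pvAccumulate] at h
      | cons y t => rfl

theorem pvFoldA_flat (l : List (List Int × List Int)) (t : Int × Int) :
    l.foldl (fun acc p => pvOpA acc (p.1.foldl (· + ·) 0, p.2.foldl (· + ·) 0)) t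
      = (t.1 + (l.flatMap (fun p => p.1)).foldl (· + ·) 0,
         t.2 + (l.flatMap (fun p => p.2)).foldl (· + ·) 0) := by
  induction l generalizing t with
  | nil => simp
  | cons p rest ih =>
      simp only [List.foldl_cons, List.flatMap_cons, List.foldl_append, ih]
      rw [pvFoldlAdd (p.1.foldl (· + ·) 0), pvFoldlAdd (p.2.foldl (· + ·) 0)]
      simp [pvOpA]
      constructor <;> ring

-- ===== VERDICT (by name: the statement is the Claim_ definition above) =====
theorem sum_invalid_product_ids_spec : Claim_equal_sum_invalid_product_ids := by
  intro l _
  unfold Spec_sum_invalid_product_ids sum_invalid_product_ids sum_invalid_product_ids_alt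
  rw [pvAccumulate_getLast, List.foldl_map]
  rw [show (fun (acc : Int × Int) (p : List Int × List Int) =>
        pvOpA acc (p.1.foldl (· + ·) 0, p.2.foldl (· + ·) 0))
      = (fun acc p => pvOpA acc (p.1.foldl (· + ·) 0, p.2.foldl (· + ·) 0)) from rfl]
  rw [pvFoldA_flat]
  simp
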